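-- pv_equiv track=rewrite | github.com/xuanxuan27/RGB_SFM_V2 | PVTv2_analyze_monkeypatch_v2.py | infer_key_grid_size
-- ===== SOURCE A (Python) =====
-- import math
-- from typing import Dict, Tuple, Any, List
--
-- def infer_key_grid_size(Nk: int, H_hint: int = None, W_hint: int = None) -> Tuple[int, int]:
--     if H_hint is not None and W_hint is not None and H_hint * W_hint == Nk:
--         return H_hint, W_hint
--
--     s = int(math.sqrt(Nk))
--     if s * s == Nk:
--         return s, s
--
--     best = (1, Nk)
--     best_gap = Nk
--     for h in range(1, int(math.sqrt(Nk)) + 1):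
--         if Nk % h == 0:
--             w = Nk // h
--             gap = abs(h - w)
--             if gap < best_gap:
--                 best = (h, w)
--                 best_gap = gap
--     return best
-- ===== SOURCE B (Python) =====
-- import math
--
-- def infer_key_grid_size(Nk, H_hint=None, W_hint=None):
--     if H_hint is not None and W_hint is not None and H_hint * W_hint == Nk:
--         return H_hint, W_hint
--
--     s = int(math.sqrt(Nk))
--     if s * s == Nk:
--         return s, s
--
--     # Among divisors <= sqrt(Nk) the largest one is closest to square:
--     # walk down from s and return the first divisor found.
--     h = s
--     while Nk % h != 0:
--         h -= 1
--     return h, Nk // h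
-- ===== Notes on version B (the rewrite author's own statement) =====
-- stated objective: simpler
-- what changed: Replaced the forward min-gap scan with best/best_gap accumulators by a downward walk from int(sqrt(Nk)) that stops at the first divisor, which is provably the pair closest to square.
import Mathlib
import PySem

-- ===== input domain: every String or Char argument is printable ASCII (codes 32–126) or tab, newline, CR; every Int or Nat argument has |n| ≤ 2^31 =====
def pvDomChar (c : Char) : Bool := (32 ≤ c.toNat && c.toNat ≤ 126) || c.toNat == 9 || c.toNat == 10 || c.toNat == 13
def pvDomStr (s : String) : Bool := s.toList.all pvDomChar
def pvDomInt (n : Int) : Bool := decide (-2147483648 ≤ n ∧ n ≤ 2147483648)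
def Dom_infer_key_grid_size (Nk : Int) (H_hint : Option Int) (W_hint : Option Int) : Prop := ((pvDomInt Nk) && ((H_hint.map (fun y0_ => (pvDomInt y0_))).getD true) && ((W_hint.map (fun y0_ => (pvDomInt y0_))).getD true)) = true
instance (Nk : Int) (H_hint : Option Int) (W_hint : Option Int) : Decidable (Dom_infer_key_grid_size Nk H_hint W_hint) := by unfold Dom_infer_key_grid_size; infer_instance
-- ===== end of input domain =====

-- B replaces A's forward min-gap scan by a downward walk from int(sqrt(Nk)) returning
-- the first divisor found (simpler: no best/best_gap accumulators).


-- ===== PORT A =====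
-- loop body of A's 'for h in range(1, int(math.sqrt(Nk)) + 1)'
def pvStepA (Nk : Int) (st : (Int × Int) × Int) (h : Int) : (Int × Int) × Int :=
  if PySem.Int.mod Nk h = 0 then
    let w := PySem.Int.floordiv Nk h
    let gap := |h - w|
    if gap < st.2 then ((h, w), gap) else st
  else st

-- A after the hint guard.  int(math.sqrt(Nk)) is ported as Nat.sqrt: exact for 0 ≤ Nk ≤ 2^31
-- (Dom's bound; CPython's double sqrt truncates to isqrt there); math.sqrt raises on Nk < 0,
-- excluded by Pre_.
def pvBodyA (Nk : Int) : Int × Int :=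
  let s : Int := (Nat.sqrt Nk.toNat : Int)
  if s * s = Nk then (s, s)
  else ((PySem.List.pyRange 1 (s + 1) 1).foldl (pvStepA Nk) ((1, Nk), Nk)).1

def infer_key_grid_size (Nk : Int) (H_hint : Option Int) (W_hint : Option Int) : Int × Int :=
  match H_hint, W_hint with
  | some hh, some ww => if hh * ww = Nk then (hh, ww) else pvBodyA Nk
  | some _, none => pvBodyA Nk
  | none, some _ => pvBodyA Nk
  | none, none => pvBodyA Nk

-- ===== PORT B =====
-- B's 'while Nk % h != 0: h -= 1' with h counted down from the fuel; at fuel 0 Python would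
-- evaluate Nk % 0 and raise ZeroDivisionError (unreachable under Pre_), we return 0.
def pvWhileDown (Nk : Int) : Nat → Int
  | 0 => 0
  | Nat.succ h => if PySem.Int.mod Nk ((h : Int) + 1) ≠ 0 then pvWhileDown Nk h else (h : Int) + 1

def pvBodyB (Nk : Int) : Int × Int :=
  let s : Nat := Nat.sqrt Nk.toNat
  if (s : Int) * (s : Int) = Nk then ((s : Int), (s : Int))
  else
    let h := pvWhileDown Nk s
    (h, PySem.Int.floordiv Nk h)

def infer_key_grid_size_alt (Nk : Int) (H_hint : Option Int) (W_hint : Option Int) : Int × Int :=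
  match H_hint, W_hint with
  | some hh, some ww => if hh * ww = Nk then (hh, ww) else pvBodyB Nk
  | some _, none => pvBodyB Nk
  | none, some _ => pvBodyB Nk
  | none, none => pvBodyB Nk

-- ===== PRECONDITION & SPEC =====
-- Pre_ excludes exactly the inputs where A raises: math.sqrt(Nk) raises ValueError on
-- Nk < 0 unless the hint guard already returned (both hints given with product Nk).
def Pre_infer_key_grid_size (Nk : Int) (H_hint : Option Int) (W_hint : Option Int) : Prop :=
  0 ≤ Nk ∨ (H_hint.isSome ∧ W_hint.isSome ∧ H_hint.getD 0 * W_hint.getD 0 = Nk)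
instance (Nk : Int) (H_hint : Option Int) (W_hint : Option Int) : Decidable (Pre_infer_key_grid_size Nk H_hint W_hint) := by unfold Pre_infer_key_grid_size; infer_instance

def pvWitness_infer_key_grid_size : Int × Option Int × Option Int := (12, none, none)

def Spec_infer_key_grid_size (Nk : Int) (H_hint : Option Int) (W_hint : Option Int) (out : Int × Int) : Prop := out = infer_key_grid_size_alt Nk H_hint W_hint
instance (Nk : Int) (H_hint : Option Int) (W_hint : Option Int) (out : Int × Int) : Decidable (Spec_infer_key_grid_size Nk H_hint W_hint out) := by unfold Spec_infer_key_grid_size; infer_instance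

-- ===== CLAIM (what is proved, stated in full; the proofs are below) =====
def Claim_equal_infer_key_grid_size : Prop := ∀ (Nk : Int) (H_hint : Option Int) (W_hint : Option Int), Dom_infer_key_grid_size Nk H_hint W_hint → Pre_infer_key_grid_size Nk H_hint W_hint → Spec_infer_key_grid_size Nk H_hint W_hint (infer_key_grid_size Nk H_hint W_hint)

-- ===== LEMMAS AND PROOFS =====

-- pvWhileDown Nk k is the largest divisor of Nk in [1, k]
lemma pvWhileDown_spec (Nk : Int) :
    ∀ (k : Nat), 1 ≤ k →
      1 ≤ pvWhileDown Nk k ∧ pvWhileDown Nk k ≤ (k : Int) ∧ pvWhileDown Nk k ∣ Nk := by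
  intro k hk
  induction k, hk using Nat.le_induction with
  | base => simp [pvWhileDown]
  | succ k hk ih =>
      by_cases hdvd : ((k : Int) + 1) ∣ Nk
      · simp [pvWhileDown, hdvd]
      · have hrec : pvWhileDown Nk (k + 1) = pvWhileDown Nk k := by
          simp [pvWhileDown, hdvd]
        rw [hrec]
        obtain ⟨i1, i2, i3⟩ := ih
        exact ⟨i1, by push_cast; omega, i3⟩

-- A's fold over range(1, k+1) holds ((d, Nk//d), Nk//d - d) for d the largest divisor ≤ k
lemma foldA_eq (Nk : Int) (hNk : 1 ≤ Nk) :
    ∀ (k : Nat), 1 ≤ k → (k : Int) * (k : Int) ≤ Nk →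
      (PySem.List.pyRange 1 ((k : Int) + 1) 1).foldl (pvStepA Nk) ((1, Nk), Nk)
        = ((pvWhileDown Nk k, Nk / pvWhileDown Nk k),
           Nk / pvWhileDown Nk k - pvWhileDown Nk k) := by
  intro k hk
  induction k, hk using Nat.le_induction with
  | base =>
      intro _
      have h1 : PySem.Int.mod Nk 1 = 0 := (PySem.Int.mod_eq_zero_iff_dvd Nk 1).mpr (one_dvd _)
      have hw : PySem.Int.floordiv Nk 1 = Nk := by
        rw [PySem.Int.floordiv_eq_ediv_of_pos (by omega)]; simp
      have habs : |(1 : Int) - Nk| = Nk - 1 := by rw [abs_of_nonpos (by omega)]; ring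
      have hd : pvWhileDown Nk 1 = 1 := by simp [pvWhileDown]
      rw [show ((1 : Nat) : Int) + 1 = (1 : Int) + 1 by norm_num,
          PySem.List.pyRange_one_singleton]
      simp only [List.foldl_cons, List.foldl_nil, hd, pvStepA]
      rw [if_pos h1]
      simp only [hw, habs]
      rw [if_pos (by omega)]
      simp
  | succ k hk ih =>
      intro hksq
      push_cast at hksq ⊢
      have hk2 : (k : Int) * (k : Int) ≤ Nk := by nlinarith
      have ihv := ih hk2
      rw [PySem.List.pyRange_one_succ_right (by omega : (1 : Int) ≤ (k : Int) + 1),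
          List.foldl_append]
      rw [ihv]
      obtain ⟨hd1, hd2, hd3⟩ := pvWhileDown_spec Nk k hk
      set d := pvWhileDown Nk k with hd
      by_cases hdvd : ((k : Int) + 1) ∣ Nk
      · -- new divisor k+1: it wins
        have hm : PySem.Int.mod Nk ((k : Int) + 1) = 0 :=
          (PySem.Int.mod_eq_zero_iff_dvd Nk _).mpr hdvd
        have hwdef : PySem.Int.floordiv Nk ((k : Int) + 1) = Nk / ((k : Int) + 1) :=
          PySem.Int.floordiv_eq_ediv_of_pos (by omega)
        have hwmul : Nk / ((k : Int) + 1) * ((k : Int) + 1) = Nk := Int.ediv_mul_cancel hdvd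
        have hdmul : Nk / d * d = Nk := Int.ediv_mul_cancel hd3
        set a := Nk / ((k : Int) + 1) with ha
        set b := Nk / d with hb
        have hb1 : 1 ≤ b := by nlinarith
        have haw : (k : Int) + 1 ≤ a := by nlinarith
        have hab : a < b := by
          by_contra hcon
          rw [not_lt] at hcon
          have h1 : b * ((k : Int) + 1) ≤ a * ((k : Int) + 1) := by nlinarith
          have h2 : b * d < b * ((k : Int) + 1) := by nlinarith
          nlinarith
        have hgaplt : |(k : Int) + 1 - a| < b - d := by
          rw [abs_of_nonpos (by omega)]; omega
        have hnew : pvWhileDown Nk (k + 1) = (k : Int) + 1 := by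
          simp [pvWhileDown, hdvd]
        rw [hnew]
        simp only [List.foldl_cons, List.foldl_nil, pvStepA]
        rw [if_pos hm]
        simp only [hwdef, ← ha]
        rw [if_pos hgaplt]
        rw [abs_of_nonpos (by omega)]
        congr 1
        ring
      · have hm : PySem.Int.mod Nk ((k : Int) + 1) ≠ 0 := by
          intro h; exact hdvd ((PySem.Int.mod_eq_zero_iff_dvd Nk _).mp h)
        have hnew : pvWhileDown Nk (k + 1) = d := by
          simp [pvWhileDown, hdvd, hd]
        rw [hnew]
        simp only [List.foldl_cons, List.foldl_nil, pvStepA]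
        rw [if_neg hm]

-- the two bodies agree for 0 ≤ Nk
lemma body_eq (Nk : Int) (hNk : 0 ≤ Nk) : pvBodyA Nk = pvBodyB Nk := by
  unfold pvBodyA pvBodyB
  set s : Nat := Nat.sqrt Nk.toNat with hs
  by_cases hsq : ((s : Nat) : Int) * ((s : Nat) : Int) = Nk
  · simp [hsq]
  · simp only [hsq, if_false]
    have hNk1 : 1 ≤ Nk := by
      rcases lt_or_eq_of_le hNk with h | h
      · omega
      · exfalso; apply hsq; rw [← h]; simp [hs, ← h]
    have hs1 : 1 ≤ s := by
      by_contra h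
      have hs0 : s = 0 := by omega
      have : Nk.toNat = 0 := by
        have := Nat.sqrt_eq_zero.mp (hs ▸ hs0 : Nat.sqrt Nk.toNat = 0)
        omega
      omega
    have hssq : (s : Int) * (s : Int) ≤ Nk := by
      have h1 : s * s ≤ Nk.toNat := by
        have := Nat.sqrt_le' Nk.toNat
        simpa [pow_two, hs] using this
      have h2 : ((s * s : Nat) : Int) ≤ ((Nk.toNat : Nat) : Int) := by exact_mod_cast h1
      push_cast at h2
      omega
    have hfold := foldA_eq Nk hNk1 s hs1 hssq
    rw [hfold]
    obtain ⟨hd1, _, _⟩ := pvWhileDown_spec Nk s hs1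
    have hfd : PySem.Int.floordiv Nk (pvWhileDown Nk s) = Nk / pvWhileDown Nk s :=
      PySem.Int.floordiv_eq_ediv_of_pos (by omega)
    rw [hfd]

-- ===== VERDICT (by name: the statement is the Claim_ definition above) =====
theorem infer_key_grid_size_spec : Claim_equal_infer_key_grid_size := by
  intro Nk H_hint W_hint _ hpre
  unfold Spec_infer_key_grid_size
  unfold infer_key_grid_size infer_key_grid_size_alt
  match H_hint, W_hint with
  | some hh, some ww =>
      by_cases hprod : hh * ww = Nk
      · simp [hprod]
      · have hNk : 0 ≤ Nk := by
          rcases hpre with h | ⟨_, _, h⟩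
          · exact h
          · exact absurd (by simpa using h) hprod
        simp [hprod, body_eq Nk hNk]
  | some hh, none =>
      have hNk : 0 ≤ Nk := by
        rcases hpre with h | ⟨_, h, _⟩
        · exact h
        · simp at h
      simp [body_eq Nk hNk]
  | none, some ww =>
      have hNk : 0 ≤ Nk := by
        rcases hpre with h | ⟨h, _, _⟩
        · exact h
        · simp at h
      simp [body_eq Nk hNk]
  | none, none =>
      have hNk : 0 ≤ Nk := by
        rcases hpre with h | ⟨h, _, _⟩
        · exact h
        · simp at h
      simp [body_eq Nk hNk]
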